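-- pv_equiv track=rewrite | github.com/Gautam-Dabral/Problem_Solving_using_Python | Test.py | costliest
-- ===== SOURCE A (Python) =====
-- def costliest (a):
--     max_total = 0
--     for i in range(len(a)):
--         total = a[i]
--         for j in range(i, len(a)-1):
--             if a[j]<a[j+1]:
--                 total += a[j+1]
--             else:
--                 break
--         if max_total < total:
--             max_total = total
--     return max_total
-- ===== SOURCE B (Python) =====
-- def costliest(a):
--     # One backward pass: maintain the sum of the strictly-increasing run
--     # starting at the current element; take the max (floored at 0).
--     best = 0
--     run = 0
--     prev = None
--     for x in reversed(a):
--         run = x + (run if (prev is not None and x < prev) else 0)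
--         if run > best:
--             best = run
--         prev = x
--     return best
-- ===== Notes on version B (the rewrite author's own statement) =====
-- stated objective: faster
-- what changed: Replaces the O(n^2) per-start rescans with a single backward pass that carries the sum of the strictly-increasing run starting at each position, taking the running maximum floored at 0.
import Mathlib
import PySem

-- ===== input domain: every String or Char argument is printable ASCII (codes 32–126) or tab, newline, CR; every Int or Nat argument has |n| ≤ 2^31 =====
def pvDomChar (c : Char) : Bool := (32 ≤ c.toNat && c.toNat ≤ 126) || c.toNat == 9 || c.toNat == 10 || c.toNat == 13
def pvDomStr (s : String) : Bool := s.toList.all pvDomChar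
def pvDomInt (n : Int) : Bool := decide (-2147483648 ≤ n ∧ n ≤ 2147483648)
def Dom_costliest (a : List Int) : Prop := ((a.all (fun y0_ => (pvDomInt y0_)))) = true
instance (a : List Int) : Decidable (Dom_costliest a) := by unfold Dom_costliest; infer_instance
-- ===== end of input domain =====

-- ===== PORT A =====
-- B changes A's per-start O(n^2) rescans into one backward pass over the list (objective: faster).

-- A's inner 'for j in range(i, len(a)-1): … else break' loop; indices j, j+1 are
-- always in range when called from costliest, so getD 0 is exact there.
def pvInnerA (a : List Int) (js : List Nat) (total : Int) : Int :=
  match js with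
  | [] => total
  | j :: rest =>
      if a.getD j 0 < a.getD (j + 1) 0 then pvInnerA a rest (total + a.getD (j + 1) 0)
      else total

def costliest (a : List Int) : Int :=
  (List.range a.length).foldl
    (fun max_total i =>
      let total := pvInnerA a (List.range' i (a.length - 1 - i)) (a.getD i 0)
      if max_total < total then total else max_total)
    0

-- ===== PORT B =====
def pvStepB (st : Int × Int × Option Int) (x : Int) : Int × Int × Option Int :=
  let best := st.1
  let run := st.2.1
  let prev := st.2.2
  let run' := x + (match prev with | some p => if x < p then run else 0 | none => 0)
  let best' := if run' > best then run' else best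
  (best', run', some x)

def costliest_alt (a : List Int) : Int :=
  (a.reverse.foldl pvStepB (0, 0, none)).1

-- ===== PRECONDITION & SPEC =====
def Spec_costliest (a : List Int) (out : Int) : Prop := out = costliest_alt a
instance (a : List Int) (out : Int) : Decidable (Spec_costliest a out) := by unfold Spec_costliest; infer_instance

-- ===== CLAIM (what is proved, stated in full; the proofs are below) =====
def Claim_equal_costliest : Prop := ∀ (a : List Int), Dom_costliest a → Spec_costliest a (costliest a)

-- ===== LEMMAS AND PROOFS =====

-- runsum a = sum of the strictly-increasing run at the head of a
def pvRunsum : List Int → Int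
  | [] => 0
  | [x] => x
  | x :: y :: t => if x < y then x + pvRunsum (y :: t) else x

-- bestOf a = max over all nonempty suffixes of their head run sums, floored at 0
def pvBestOf : List Int → Int
  | [] => 0
  | x :: t => max (pvBestOf t) (pvRunsum (x :: t))

theorem pvInnerA_shift (a : List Int) (js : List Nat) (t s : Int) :
    pvInnerA a js (t + s) = t + pvInnerA a js s := by
  induction js generalizing s with
  | nil => rfl
  | cons j rest ih =>
      simp only [pvInnerA]
      split
      · rw [add_assoc, ih]
      · rfl

theorem pvInnerA_runsum (a : List Int) (i : Nat) (h : i < a.length) :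
    pvInnerA a (List.range' i (a.length - 1 - i)) (a.getD i 0) = pvRunsum (a.drop i) := by
  have hk : a.length - 1 - i = a.length - (i + 1) := by omega
  by_cases hlast : i + 1 = a.length
  · -- last element: empty inner range, drop i = [a[i]]
    have h0 : a.length - 1 - i = 0 := by omega
    rw [h0]
    have hd : a.drop i = [a[i]] := by
      have := List.drop_eq_getElem_cons h
      rw [this, List.drop_eq_nil_of_le (by omega)]
    rw [hd]
    simp [pvInnerA, pvRunsum, List.getD_eq_getElem?_getD, h]
  · have hi1 : i + 1 < a.length := by omega
    have hrange : a.length - 1 - i = 1 + (a.length - 1 - (i + 1)) := by omega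
    rw [hrange, List.range'_eq_cons_iff.mpr ⟨rfl, by omega, by rw [Nat.add_sub_cancel_left]⟩]
    simp only [pvInnerA]
    have hgi : a.getD i 0 = a[i] := by simp [List.getD_eq_getElem?_getD, h]
    have hgi1 : a.getD (i + 1) 0 = a[i + 1] := by simp [List.getD_eq_getElem?_getD, hi1]
    have hd : a.drop i = a[i] :: a.drop (i + 1) := List.drop_eq_getElem_cons h
    have hd1 : a.drop (i + 1) = a[i + 1] :: a.drop (i + 2) := List.drop_eq_getElem_cons hi1
    split
    · -- a[i] < a[i+1] : continue; total is affine
      rename_i hlt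
      rw [hgi, hgi1] at hlt ⊢
      have ih := pvInnerA_runsum a (i + 1) hi1
      rw [hgi1] at ih
      rw [pvInnerA_shift a _ a[i] a[i+1], ih, hd, hd1]
      simp [pvRunsum, hlt]
    · rename_i hge
      rw [hgi, hgi1] at hge
      rw [hgi, hd, hd1]
      simp [pvRunsum, hge]
termination_by a.length - i

theorem pvRunsum_cons (x : Int) (t : List Int) :
    pvRunsum (x :: t) = x + (match t.head? with
      | some p => if x < p then pvRunsum t else 0
      | none => 0) := by
  cases t with
  | nil => simp [pvRunsum]
  | cons y t' =>
      simp only [pvRunsum, List.head?]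
      split <;> simp

-- B's fold state after processing a.reverse
theorem pvFoldB_spec (a : List Int) :
    a.reverse.foldl pvStepB (0, 0, none) = (pvBestOf a, pvRunsum a, a.head?) := by
  induction a with
  | nil => rfl
  | cons x t ih =>
      rw [List.reverse_cons, List.foldl_append, ih]
      simp only [List.foldl, pvStepB]
      rw [← pvRunsum_cons x t]
      have : (if pvRunsum (x :: t) > pvBestOf t then pvRunsum (x :: t) else pvBestOf t)
           = max (pvBestOf t) (pvRunsum (x :: t)) := by
        rw [max_comm, max_def]; split <;> split <;> omega
      rw [this]
      simp [pvBestOf]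

theorem pv_foldl_max_out (l : List Int) (c v : Int) :
    l.foldl max (max c v) = max (l.foldl max c) v := by
  induction l generalizing c with
  | nil => rfl
  | cons y l ih =>
      simp only [List.foldl]
      rw [max_right_comm, ih]

theorem pv_range_fold_bestOf (a : List Int) :
    ((List.range a.length).map (fun i => pvRunsum (a.drop i))).foldl max 0 = pvBestOf a := by
  induction a with
  | nil => rfl
  | cons x t ih =>
      rw [List.length_cons, List.range_succ_eq_map]
      simp only [List.map_cons, List.map_map, List.foldl_cons]
      have hmap : (List.range t.length).map ((fun i => pvRunsum ((x :: t).drop i)) ∘ Nat.succ)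
                = (List.range t.length).map (fun i => pvRunsum (t.drop i)) := by
        apply List.map_congr_left; intro i _; rfl
      rw [hmap, show max 0 (pvRunsum ((x :: t).drop 0)) = max 0 (pvRunsum (x :: t)) from rfl,
          pv_foldl_max_out, ih]
      simp [pvBestOf]

-- ===== VERDICT (by name: the statement is the Claim_ definition above) =====
theorem costliest_spec : Claim_equal_costliest := by
  intro a _
  unfold Spec_costliest costliest costliest_alt
  rw [pvFoldB_spec]
  have hstep : (List.range a.length).foldl
      (fun max_total i =>
        let total := pvInnerA a (List.range' i (a.length - 1 - i)) (a.getD i 0)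
        if max_total < total then total else max_total) 0
      = (List.range a.length).foldl (fun m i => max m (pvRunsum (a.drop i))) 0 := by
    apply PySem.List.foldl_congr_mem
    intro m i hi
    have hilt : i < a.length := List.mem_range.mp hi
    simp only [pvInnerA_runsum a i hilt]
    rw [max_def]; split <;> split <;> omega
  rw [hstep, ← List.foldl_map, pv_range_fold_bestOf]
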